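-- pv_equiv track=rewrite | github.com/NelsonBN/algorithms-data-structures-recursion | src/examples/matrix_zoom_in.py | zoom_in
-- ===== SOURCE A (Python) =====
-- def zoom_in(matrix, zoom): # Time complexity: O(n^2), Space complexity: O(n^2)
--     if zoom <= 1:
--         return matrix
--
--     rows = len(matrix)
--     if rows - 2 < 2:
--         return matrix
--
--     cols = len(matrix[0])
--     if cols - 2 < 2:
--         return matrix
--
--     rows -= 1
--     cols -= 1
--
--     sub_matrix = [row[1:cols] for row in matrix[1:rows]]
--
--     return zoom_in(sub_matrix, zoom - 1)
-- ===== SOURCE B (Python) =====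
-- def zoom_in(matrix, zoom):
--     rows = len(matrix)
--     cols = len(matrix[0]) if matrix else 0
--     k = min(zoom - 1, (rows - 2) // 2, (cols - 2) // 2)
--     if k <= 0:
--         return matrix
--     return [row[k:cols - k] for row in matrix[k:rows - k]]
-- ===== Notes on version B (the rewrite author's own statement) =====
-- stated objective: faster
-- what changed: Replaces A's recursion that copies the whole matrix once per zoom level by a closed-form computation of the strip count k followed by a single slice; Pre_ excludes ragged inputs (rows of unequal length), which are not matrices and on which A's per-level clamped slicing result is an accident of its implementation.
import Mathlib
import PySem

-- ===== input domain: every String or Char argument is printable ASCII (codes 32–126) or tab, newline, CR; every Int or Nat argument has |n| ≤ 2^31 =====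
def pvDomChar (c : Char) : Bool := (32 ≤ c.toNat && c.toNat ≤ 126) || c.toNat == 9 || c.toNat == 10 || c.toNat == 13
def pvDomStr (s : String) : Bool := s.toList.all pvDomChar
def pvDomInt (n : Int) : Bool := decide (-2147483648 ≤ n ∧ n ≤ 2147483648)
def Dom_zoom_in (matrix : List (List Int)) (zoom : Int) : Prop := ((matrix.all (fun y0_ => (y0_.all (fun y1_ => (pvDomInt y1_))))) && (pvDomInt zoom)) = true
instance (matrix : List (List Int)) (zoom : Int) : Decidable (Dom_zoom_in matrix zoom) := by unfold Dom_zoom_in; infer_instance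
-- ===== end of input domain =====

-- B computes the number of stripped borders k in closed form and slices the matrix once,
-- instead of A's recursion that copies the whole matrix once per zoom level.

-- ===== PORT A =====
-- length bound for the sub-matrix A recurses on (needed by the port's decreasing_by)
theorem zoomA_sub_length (matrix : List (List Int)) (h : ¬ ((matrix.length : Int) - 2 < 2)) :
    ((PySem.List.slice matrix (some 1) (some ((matrix.length : Int) - 1))).map
      (fun row => PySem.List.slice row (some 1) (some (((PySem.List.pyGetD matrix 0 []).length : Int) - 1)))).length
      < matrix.length := by
  rw [List.length_map, PySem.List.slice_toNat _ (by omega) (by omega)]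
  simp only [List.length_take, List.length_drop]
  omega

def zoom_in (matrix : List (List Int)) (zoom : Int) : List (List Int) :=
  if zoom ≤ 1 then matrix
  else if h : (matrix.length : Int) - 2 < 2 then matrix
  else
    let cols : Int := (PySem.List.pyGetD matrix 0 []).length
    if cols - 2 < 2 then matrix
    else
      let rows1 : Int := (matrix.length : Int) - 1
      let cols1 : Int := cols - 1
      let sub := (PySem.List.slice matrix (some 1) (some rows1)).map
        (fun row => PySem.List.slice row (some 1) (some cols1))
      zoom_in sub (zoom - 1)
termination_by matrix.length
decreasing_by exact zoomA_sub_length matrix h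

-- ===== PORT B =====
def zoom_in_alt (matrix : List (List Int)) (zoom : Int) : List (List Int) :=
  let rows : Int := matrix.length
  let cols : Int := match matrix with | [] => 0 | r :: _ => (r.length : Int)
  let k : Int := min (zoom - 1) (min (PySem.Int.floordiv (rows - 2) 2) (PySem.Int.floordiv (cols - 2) 2))
  if k ≤ 0 then matrix
  else (PySem.List.slice matrix (some k) (some (rows - k))).map
    (fun row => PySem.List.slice row (some k) (some (cols - k)))

-- ===== PRECONDITION & SPEC =====
-- Pre_ excludes ragged inputs (rows of unequal length) that are big and deep enough for more
-- than one border strip: raggedness is malformed input for a matrix function, and there A's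
-- result is an accident of its per-level clamped slicing.
def Pre_zoom_in (matrix : List (List Int)) (zoom : Int) : Prop :=
  (∀ r ∈ matrix, r.length = (matrix.headD []).length)
    ∨ zoom ≤ 2 ∨ matrix.length ≤ 5 ∨ (matrix.headD []).length ≤ 5
instance (matrix : List (List Int)) (zoom : Int) : Decidable (Pre_zoom_in matrix zoom) := by
  unfold Pre_zoom_in; infer_instance

def pvWitness_zoom_in : List (List Int) × Int :=
  ([[1, 2, 3, 4], [5, 6, 7, 8], [9, 10, 11, 12], [13, 14, 15, 16]], 2)

def Spec_zoom_in (matrix : List (List Int)) (zoom : Int) (out : List (List Int)) : Prop := out = zoom_in_alt matrix zoom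
instance (matrix : List (List Int)) (zoom : Int) (out : List (List Int)) : Decidable (Spec_zoom_in matrix zoom out) := by unfold Spec_zoom_in; infer_instance

-- ===== CLAIM (what is proved, stated in full; the proofs are below) =====
def Claim_equal_zoom_in : Prop := ∀ (matrix : List (List Int)) (zoom : Int), Dom_zoom_in matrix zoom → Pre_zoom_in matrix zoom → Spec_zoom_in matrix zoom (zoom_in matrix zoom)

-- ===== LEMMAS AND PROOFS =====

-- proof-only view of zoom_in_alt with the row/column counts as explicit arguments
def altOf (matrix : List (List Int)) (zoom R C : Int) : List (List Int) :=
  let k : Int := min (zoom - 1) (min (PySem.Int.floordiv (R - 2) 2) (PySem.Int.floordiv (C - 2) 2))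
  if k ≤ 0 then matrix
  else (PySem.List.slice matrix (some k) (some (R - k))).map
    (fun row => PySem.List.slice row (some k) (some (C - k)))

theorem alt_eq (matrix : List (List Int)) (zoom : Int) :
    zoom_in_alt matrix zoom
      = altOf matrix zoom (matrix.length : Int) (((matrix.headD []).length : Nat) : Int) := by
  cases matrix <;> rfl

-- composition of the border strip with a deeper slice, on Nat drop/take
theorem strip_slice {α : Type} (xs : List α) (A B C : Nat) (h1 : 1 ≤ A) (hAB : A ≤ B) (hBC : B ≤ C - 1) :
    (((xs.drop 1).take (C - 2)).drop (A - 1)).take (B - A) = (xs.drop A).take (B - A) := by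
  rw [List.drop_take, List.drop_drop, List.take_take]
  rw [show 1 + (A - 1) = A from by omega, show min (B - A) (C - 2 - (A - 1)) = B - A from by omega]

-- bracket facts for floor division by two
theorem fdiv2_bracket (x : Int) :
    2 * PySem.Int.floordiv x 2 ≤ x ∧ x < 2 * PySem.Int.floordiv x 2 + 2 := by
  have h := (PySem.Int.floordiv_eq_iff_of_pos (a := x) (b := 2)
    (q := PySem.Int.floordiv x 2) (by norm_num)).mp rfl
  omega

theorem zoom_eq (N : Nat) : ∀ (matrix : List (List Int)) (zoom : Int), matrix.length = N →
    Pre_zoom_in matrix zoom → zoom_in matrix zoom = zoom_in_alt matrix zoom := by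
  induction N using Nat.strong_induction_on with
  | _ N ih =>
    intro matrix zoom hN hpre
    obtain ⟨hkn1, hkn2⟩ := fdiv2_bracket ((matrix.length : Int) - 2)
    rw [zoom_in]
    by_cases h1 : zoom ≤ 1
    · rw [if_pos h1]
      simp only [zoom_in_alt]
      rw [if_pos (by omega)]
    · rw [if_neg h1]
      by_cases h2 : (matrix.length : Int) - 2 < 2
      · rw [dif_pos h2]
        simp only [zoom_in_alt]
        rw [if_pos (by omega)]
      · rw [dif_neg h2]
        simp only
        -- matrix is nonempty: name its head
        obtain ⟨r, rest, hm⟩ : ∃ r rest, matrix = r :: rest := by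
          cases matrix with
          | nil => simp at h2
          | cons r rest => exact ⟨r, rest, rfl⟩
        have hget0 : PySem.List.pyGetD matrix 0 [] = r := by
          rw [hm]; exact PySem.List.pyGetD_zero_cons r rest []
        obtain ⟨hkm1, hkm2⟩ := fdiv2_bracket ((r.length : Int) - 2)
        rw [hget0]
        by_cases h3 : (r.length : Int) - 2 < 2
        · rw [if_pos h3, hm]
          simp only [zoom_in_alt]
          rw [if_pos (by omega)]
        · rw [if_neg h3]
          -- main case: one strip happens in A
          set n : Nat := matrix.length with hn
          set m : Nat := r.length with hmr
          have hn4 : 4 ≤ n := by omega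
          have hm4 : 4 ≤ m := by omega
          -- the sub-matrix in Nat form
          have hslice_rows : PySem.List.slice matrix (some 1) (some ((n : Int) - 1))
              = (matrix.drop 1).take (n - 2) := by
            rw [show ((n : Int) - 1) = ((n - 1 : Nat) : Int) from by omega,
                show ((1 : Int)) = ((1 : Nat) : Int) from by norm_num,
                PySem.List.slice_natCast]
            congr 1
          have hslice_row : ∀ row : List Int, PySem.List.slice row (some 1) (some ((m : Int) - 1))
              = (row.drop 1).take (m - 2) := by
            intro row
            rw [show ((m : Int) - 1) = ((m - 1 : Nat) : Int) from by omega,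
                show ((1 : Int)) = ((1 : Nat) : Int) from by norm_num,
                PySem.List.slice_natCast]
            congr 1
          set sub : List (List Int) := ((matrix.drop 1).take (n - 2)).map
            (fun row => (row.drop 1).take (m - 2)) with hsub
          rw [hslice_rows, List.map_congr_left (fun row _ => hslice_row row), ← hsub]
          -- sub's shape
          have hsublen : sub.length = n - 2 := by
            rw [hsub, List.length_map, List.length_take, List.length_drop]; omega
          have hsubne : sub ≠ [] := by
            intro h
            rw [h] at hsublen
            simp at hsublen
            omega
          obtain ⟨s1, stail, hsubE⟩ := List.exists_cons_of_ne_nil hsubne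
          have hs1mem : s1 ∈ sub := by rw [hsubE]; simp
          have hs1le : s1.length ≤ m - 2 := by
            rw [hsub] at hs1mem
            obtain ⟨row0, _, hdef⟩ := List.mem_map.mp hs1mem
            rw [← hdef]
            simp only [List.length_take]
            omega
          have hCmat : (((matrix.headD []).length : Nat) : Int) = (m : Int) := by
            rw [hm]
            rfl
          -- rewrite the right-hand side through altOf with the counts n and m
          rw [alt_eq matrix, hCmat, ← hn]
          simp only [altOf]
          -- closed-form strip counts shift by one on the sub-matrix
          have hfn : PySem.Int.floordiv (((n : Int) - 2) - 2) 2 = PySem.Int.floordiv ((n : Int) - 2) 2 - 1 := by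
            rw [PySem.Int.floordiv_eq_iff_of_pos (by norm_num)]
            omega
          have hfm : PySem.Int.floordiv (((m : Int) - 2) - 2) 2 = PySem.Int.floordiv ((m : Int) - 2) 2 - 1 := by
            rw [PySem.Int.floordiv_eq_iff_of_pos (by norm_num)]
            omega
          set kN : Int := PySem.Int.floordiv ((n : Int) - 2) 2 with hkN
          set kM : Int := PySem.Int.floordiv ((m : Int) - 2) 2 with hkM
          set k : Int := min (zoom - 1) (min kN kM) with hk
          have hk1 : 1 ≤ k := by
            rw [hk]
            simp only [le_min_iff]
            omega
          by_cases hkone : k - 1 ≤ 0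
          · -- at most one strip fits: A stops right after the first strip, B slices one border
            have hA : zoom_in sub (zoom - 1) = sub := by
              rw [zoom_in]
              by_cases c1 : zoom - 1 ≤ 1
              · rw [if_pos c1]
              · rw [if_neg c1]
                by_cases c2 : ((sub.length : Nat) : Int) - 2 < 2
                · rw [dif_pos c2]
                · rw [dif_neg c2]
                  simp only
                  have hget0s : PySem.List.pyGetD sub 0 [] = s1 := by
                    rw [hsubE]; exact PySem.List.pyGetD_zero_cons s1 stail []
                  rw [hget0s]
                  rw [if_pos (by
                    have hk' := hk
                    omega)]
            rw [hA]
            rw [if_neg (by omega : ¬ k ≤ 0)]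
            rw [show k = 1 from by omega]
            rw [hslice_rows, List.map_congr_left (fun row _ => hslice_row row)]
          · -- two or more strips fit: Pre_ forces a rectangular matrix; recurse and compose
            have hrect : ∀ r' ∈ matrix, r'.length = (matrix.headD []).length := by
              rcases hpre with h | h | h | h
              · exact h
              · exfalso; omega
              · exfalso; omega
              · exfalso
                have := hCmat
                omega
            have hrowlen : ∀ row ∈ matrix, row.length = m := by
              intro row hrow
              have := hrect row hrow
              rw [hm] at this
              simpa using this
            have hsubrow : ∀ row ∈ sub, row.length = m - 2 := by
              intro row hrow
              rw [hsub] at hrow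
              obtain ⟨row0, hrow0, hdef⟩ := List.mem_map.mp hrow
              have h0 : row0 ∈ matrix := List.mem_of_mem_drop (List.mem_of_mem_take hrow0)
              rw [← hdef]
              simp only [List.length_take, List.length_drop, hrowlen row0 h0]
              omega
            have hsubpre : Pre_zoom_in sub (zoom - 1) := by
              left
              intro row hrow
              have hhead : sub.headD [] ∈ sub := by
                cases hsubE' : sub with
                | nil => rw [hsubE'] at hrow; simp at hrow
                | cons a l => simp
              rw [hsubrow row hrow, hsubrow _ hhead]
            rw [ih (n - 2) (by omega) sub (zoom - 1) hsublen hsubpre]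
            have hs1len : (s1.length : Int) = (m : Int) - 2 := by
              have := hsubrow s1 hs1mem
              omega
            have hCsub : (((sub.headD []).length : Nat) : Int) = (m : Int) - 2 := by
              rw [hsubE]
              exact hs1len
            rw [alt_eq sub, hCsub, hsublen]
            rw [show (((n - 2 : Nat)) : Int) = (n : Int) - 2 from by omega]
            simp only [altOf, hfn, hfm]
            have hksub : min (zoom - 1 - 1) (min (kN - 1) (kM - 1)) = k - 1 := by
              rw [hk]; omega
            rw [hksub]
            rw [if_neg hkone, if_neg (by omega : ¬ k ≤ 0)]
            obtain ⟨K, hK⟩ : ∃ K : Nat, k = (K : Int) := ⟨k.toNat, by omega⟩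
            have hK1 : 1 ≤ K := by omega
            have hKn : 2 * K ≤ n - 2 := by omega
            have hKm : 2 * K ≤ m - 2 := by omega
            rw [hK]
            rw [show ((n : Int) - 2 - ((K : Int) - 1)) = ((n - 2 - (K - 1) : Nat) : Int) from by omega,
                show ((m : Int) - 2 - ((K : Int) - 1)) = ((m - 2 - (K - 1) : Nat) : Int) from by omega,
                show ((n : Int) - (K : Int)) = ((n - K : Nat) : Int) from by omega,
                show ((m : Int) - (K : Int)) = ((m - K : Nat) : Int) from by omega,
                show ((K : Int) - 1) = ((K - 1 : Nat) : Int) from by omega]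
            rw [PySem.List.slice_natCast, PySem.List.slice_natCast]
            rw [hsub, ← List.map_drop, ← List.map_take, List.map_map]
            rw [show n - 2 - (K - 1) - (K - 1) = (n - K) - K from by omega]
            rw [show (List.take (n - 2) (List.drop 1 matrix)) = ((matrix.drop 1).take (n - 2)) from rfl]
            rw [strip_slice matrix K (n - K) n hK1 (by omega) (by omega)]
            apply List.map_congr_left
            intro row _
            simp only [Function.comp]
            rw [PySem.List.slice_natCast, PySem.List.slice_natCast]
            rw [show m - 2 - (K - 1) - (K - 1) = (m - K) - K from by omega]
            exact strip_slice row K (m - K) m hK1 (by omega) (by omega)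

-- ===== VERDICT (by name: the statement is the Claim_ definition above) =====
theorem zoom_in_spec : Claim_equal_zoom_in := by
  intro matrix zoom _ hpre
  exact zoom_eq matrix.length matrix zoom rfl hpre
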